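-- pv_equiv track=rewrite | github.com/1semptify-arch/Semptify | app/core/id_gen.py | validate_id
-- ===== SOURCE A (Python) =====
-- from typing import Optional
-- import string
--
-- _ALPHABET = string.ascii_letters + string.digits
--
-- def parse_id(full_id: str) -> tuple[str, str]:
--     """Parse a full ID into (prefix, suffix).
--
--     Args:
--         full_id: ID like "doc_K8mXp2nR4jW7qF9a"
--
--     Returns:
--         Tuple of (prefix, suffix)
--
--     Raises:
--         ValueError: If ID format is invalid
--     """
--     if "_" not in full_id:
--         raise ValueError(f"Invalid ID format (no underscore): {full_id}")
--
--     parts = full_id.split("_", 1)  # Split on first underscore only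
--     prefix, suffix = parts[0], parts[1]
--
--     if not prefix or not suffix:
--         raise ValueError(f"Invalid ID format (empty prefix or suffix): {full_id}")
--
--     return prefix, suffix
--
-- def validate_id(full_id: str, expected_prefix: Optional[str] = None) -> bool:
--     """Validate an ID format and optionally check prefix.
--
--     Args:
--         full_id: ID to validate
--         expected_prefix: If provided, verify ID has this prefix
--
--     Returns:
--         True if valid, False otherwise
--     """
--     try:
--         prefix, suffix = parse_id(full_id)
--
--         # Check prefix if specified
--         if expected_prefix and prefix != expected_prefix:
--             return False
--
--         # Check suffix is valid alphanumeric
--         if not suffix or not all(c in _ALPHABET for c in suffix):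
--             return False
--
--         return True
--     except ValueError:
--         return False
-- ===== SOURCE B (Python) =====
-- from typing import Optional
--
--
-- def validate_id(full_id: str, expected_prefix: Optional[str] = None) -> bool:
--     # Single left-to-right pass: a small state machine. State 0 accumulates the
--     # prefix until the first underscore; state 1 validates each suffix character
--     # on the fly. No split, find or slicing.
--     in_suffix = False
--     prefix = ""
--     suffix_len = 0
--     suffix_ok = True
--     for c in full_id:
--         if not in_suffix:
--             if c == "_":
--                 in_suffix = True
--             else:
--                 prefix += c
--         else:
--             suffix_len += 1
--             if not ("A" <= c <= "Z" or "a" <= c <= "z" or "0" <= c <= "9"):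
--                 suffix_ok = False
--     if not in_suffix or not prefix or suffix_len == 0 or not suffix_ok:
--         return False
--     if expected_prefix and prefix != expected_prefix:
--         return False
--     return True
-- ===== Notes on version B (the rewrite author's own statement) =====
-- stated objective: alternative
-- what changed: Replaces A's split-at-first-underscore plus exception-driven parse_id helper and separate all(...) alphabet scan with a single left-to-right state-machine pass that accumulates the prefix and validates suffix characters on the fly, with no split, find, slicing or exception handling.
import Mathlib
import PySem

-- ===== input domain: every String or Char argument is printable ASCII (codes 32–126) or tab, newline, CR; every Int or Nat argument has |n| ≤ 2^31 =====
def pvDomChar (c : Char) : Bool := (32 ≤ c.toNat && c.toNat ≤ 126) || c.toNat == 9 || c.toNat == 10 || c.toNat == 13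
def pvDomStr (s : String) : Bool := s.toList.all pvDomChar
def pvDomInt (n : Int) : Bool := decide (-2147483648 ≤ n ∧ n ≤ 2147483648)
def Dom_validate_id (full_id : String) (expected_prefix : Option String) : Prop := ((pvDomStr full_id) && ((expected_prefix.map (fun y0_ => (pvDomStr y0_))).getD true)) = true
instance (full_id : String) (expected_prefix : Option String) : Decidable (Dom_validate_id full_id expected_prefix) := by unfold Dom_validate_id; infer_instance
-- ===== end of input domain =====

-- B replaces A's split-at-first-underscore parse_id helper (with try/except) and separate
-- alphabet scan by a single left-to-right state-machine pass over the characters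
-- (objective: alternative decomposition, same O(n) cost).


-- ===== PORT A =====
-- _ALPHABET = string.ascii_letters + string.digits
def pvAlphabet : List Char :=
  String.toList "abcdefghijklmnopqrstuvwxyzABCDEFGHIJKLMNOPQRSTUVWXYZ0123456789"

-- parse_id: 'raise ValueError' is ported as 'none'
def parse_id (full_id : String) : Option (String × String) :=
  if PySem.Str.isIn "_" full_id = false then none
  else
    match (PySem.Str.splitMax? full_id "_" 1).getD [] with
    | p :: s :: _ =>
        if p.toList = [] ∨ s.toList = [] then none else some (p, s)
    | _ => none

def validate_id (full_id : String) (expected_prefix : Option String) : Bool :=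
  match parse_id full_id with
  | none => false          -- 'except ValueError: return False'
  | some (p, s) =>
    -- 'if expected_prefix and prefix != expected_prefix: return False'
    let prefixBad : Bool :=
      match expected_prefix with
      | some e => (!e.toList.isEmpty) && decide (p.toList ≠ e.toList)
      | none => false
    if prefixBad then false
    else if s.toList.isEmpty || !(s.toList.all (fun c => pvAlphabet.contains c)) then false
    else true

-- ===== PORT B =====
-- '"A" <= c <= "Z" or "a" <= c <= "z" or "0" <= c <= "9"'
def pvIsIdChar (c : Char) : Bool :=
  ('A' ≤ c && c ≤ 'Z') || ('a' ≤ c && c ≤ 'z') || ('0' ≤ c && c ≤ '9')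

-- one step of Source B's loop; state = (in_suffix, prefix, suffix_len, suffix_ok)
def pvStep (s : Bool × List Char × Nat × Bool) (c : Char) : Bool × List Char × Nat × Bool :=
  match s with
  | (inSuf, pre, slen, sok) =>
    if !inSuf then
      if c = '_' then (true, pre, slen, sok) else (false, pre ++ [c], slen, sok)
    else
      (true, pre, slen + 1, if pvIsIdChar c then sok else false)

def validate_id_alt (full_id : String) (expected_prefix : Option String) : Bool :=
  match full_id.toList.foldl pvStep (false, [], 0, true) with
  | (inSuf, pre, slen, sok) =>
    if !inSuf || pre.isEmpty || slen == 0 || !sok then false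
    else
      let bad : Bool :=
        match expected_prefix with
        | some e => (!e.toList.isEmpty) && decide (pre ≠ e.toList)
        | none => false
      if bad then false else true

-- ===== PRECONDITION & SPEC =====
def Spec_validate_id (full_id : String) (expected_prefix : Option String) (out : Bool) : Prop := out = validate_id_alt full_id expected_prefix
instance (full_id : String) (expected_prefix : Option String) (out : Bool) : Decidable (Spec_validate_id full_id expected_prefix out) := by unfold Spec_validate_id; infer_instance

-- ===== CLAIM (what is proved, stated in full; the proofs are below) =====
def Claim_equal_validate_id : Prop := ∀ (full_id : String) (expected_prefix : Option String), Dom_validate_id full_id expected_prefix → Spec_validate_id full_id expected_prefix (validate_id full_id expected_prefix)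

-- ===== LEMMAS AND PROOFS =====

-- the alphabet membership test of A and the range test of B agree on all 7-bit characters
set_option maxRecDepth 8192 in
lemma alpha_eq_idchar_fin : ∀ n : Fin 128,
    pvAlphabet.contains (Char.ofNat n.val) = pvIsIdChar (Char.ofNat n.val) := by
  decide

lemma alpha_eq_idchar {c : Char} (h : pvDomChar c = true) :
    pvAlphabet.contains c = pvIsIdChar c := by
  have hlt : c.toNat < 128 := by
    simp only [pvDomChar, Bool.or_eq_true, Bool.and_eq_true, decide_eq_true_eq,
      beq_iff_eq] at h
    omega
  have := alpha_eq_idchar_fin ⟨c.toNat, hlt⟩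
  simpa [Char.ofNat_toNat] using this

lemma all_congr_of_mem {l : List Char} {f g : Char → Bool}
    (h : ∀ c ∈ l, f c = g c) : l.all f = l.all g := by
  induction l with
  | nil => rfl
  | cons c rest ih =>
    simp only [List.all_cons, h c (List.mem_cons_self ..),
      ih (fun x hx => h x (List.mem_cons_of_mem _ hx))]

-- splitOnMax.go with maxsplit exhausted dumps the rest
lemma go_m0 (fuel : Nat) (l cur : List Char) (accs : List (List Char)) :
    PySem.Chars.splitOnMax.go ['_'] fuel 0 l cur accs = accs.reverse ++ [cur.reverse ++ l] := by
  cases fuel with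
  | zero => simp [PySem.Chars.splitOnMax.go]
  | succ f => cases l with
    | nil => simp [PySem.Chars.splitOnMax.go]
    | cons c rest => simp [PySem.Chars.splitOnMax.go]

lemma go_us (pre : List Char) (h : '_' ∉ pre) :
    ∀ (suf : List Char) (fuel : Nat) (cur : List Char) (accs : List (List Char)),
    pre.length < fuel →
    PySem.Chars.splitOnMax.go ['_'] fuel 1 (pre ++ '_' :: suf) cur accs =
      accs.reverse ++ [cur.reverse ++ pre, suf] := by
  induction pre with
  | nil =>
    intro suf fuel cur accs hf
    cases fuel with
    | zero => omega
    | succ f =>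
      simp only [List.nil_append]
      rw [PySem.Chars.splitOnMax.go]
      rw [if_neg (by simp : ¬ (1 : Nat) = 0),
        if_pos (by simp [List.isPrefixOf] : ['_'].isPrefixOf ('_' :: suf) = true)]
      rw [go_m0]
      simp
  | cons c rest ih =>
    intro suf fuel cur accs hf
    have hc : c ≠ '_' := by intro hc; exact h (hc ▸ List.mem_cons_self ..)
    have hr : '_' ∉ rest := fun hm => h (List.mem_cons_of_mem _ hm)
    cases fuel with
    | zero => omega
    | succ f =>
      simp only [List.cons_append]
      rw [PySem.Chars.splitOnMax.go]
      rw [if_neg (by simp : ¬ (1 : Nat) = 0)]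
      rw [if_neg (by simp [List.isPrefixOf]; exact fun h' => hc h'.symm :
        ¬ (['_'].isPrefixOf (c :: (rest ++ '_' :: suf)) = true))]
      rw [ih hr suf f (c :: cur) accs (by simp at hf ⊢; omega)]
      simp

lemma splitOnMax_us (pre suf : List Char) (h : '_' ∉ pre) :
    PySem.Chars.splitOnMax (pre ++ '_' :: suf) ['_'] 1 = [pre, suf] := by
  rw [PySem.Chars.splitOnMax]
  rw [if_neg (by norm_num)]
  simp only [Int.toNat_one]
  rw [go_us pre h suf _ [] [] (by simp)]
  simp

lemma splitMax_us (full : String) (pre suf : List Char)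
    (hcs : full.toList = pre ++ '_' :: suf) (hpre : '_' ∉ pre) :
    PySem.Str.splitMax? full "_" 1 = some [String.ofList pre, String.ofList suf] := by
  have h1 : ("_" : String).toList = ['_'] := by decide
  simp only [PySem.Str.splitMax?, PySem.Chars.splitMax?, h1, hcs]
  rw [if_neg (by simp)]
  rw [splitOnMax_us pre suf hpre]
  simp

-- decomposition of a string at its FIRST underscore
lemma underscore_decomp (cs : List Char) (h : '_' ∈ cs) :
    ∃ pre suf : List Char, cs = pre ++ '_' :: suf ∧ '_' ∉ pre := by
  induction cs with
  | nil => cases h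
  | cons c rest ih =>
    by_cases hc : c = '_'
    · exact ⟨[], rest, by simp [hc], by simp⟩
    · have hr : '_' ∈ rest := by
        rcases List.mem_cons.1 h with h1 | h1
        · exact absurd h1.symm hc
        · exact h1
      obtain ⟨p, s, hps, hnp⟩ := ih hr
      exact ⟨c :: p, s, by simp [hps], by simp [hnp]; exact fun e => hc e.symm⟩

-- B's loop while still in the prefix
lemma foldl_step_pre (pre : List Char) (h : '_' ∉ pre) :
    ∀ (acc : List Char) (n : Nat) (b : Bool),
    pre.foldl pvStep (false, acc, n, b) = (false, acc ++ pre, n, b) := by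
  induction pre with
  | nil => intro acc n b; simp
  | cons c rest ih =>
    intro acc n b
    have hc : c ≠ '_' := fun e => h (e ▸ List.mem_cons_self ..)
    have hr : '_' ∉ rest := fun hm => h (List.mem_cons_of_mem _ hm)
    have hstep : pvStep (false, acc, n, b) c = (false, acc ++ [c], n, b) := by
      simp [pvStep, hc]
    rw [List.foldl_cons, hstep, ih hr]
    simp

-- B's loop once in the suffix
lemma foldl_step_suf (suf : List Char) :
    ∀ (acc : List Char) (n : Nat) (b : Bool),
    suf.foldl pvStep (true, acc, n, b) = (true, acc, n + suf.length, b && suf.all pvIsIdChar) := by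
  induction suf with
  | nil => intro acc n b; simp
  | cons c rest ih =>
    intro acc n b
    have hstep : pvStep (true, acc, n, b) c =
        (true, acc, n + 1, if pvIsIdChar c then b else false) := by
      simp [pvStep]
    rw [List.foldl_cons, hstep, ih]
    simp only [List.all_cons, List.length_cons, Prod.mk.injEq, true_and]
    refine ⟨by omega, ?_⟩
    cases hb : b <;> cases hcid : pvIsIdChar c <;> simp

-- ===== VERDICT (by name: the statement is the Claim_ definition above) =====
theorem validate_id_spec : Claim_equal_validate_id := by
  intro full ep hdom
  unfold Spec_validate_id
  have hdomf : pvDomStr full = true := by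
    unfold Dom_validate_id at hdom
    simp only [Bool.and_eq_true] at hdom
    exact hdom.1
  by_cases h : '_' ∈ full.toList
  · obtain ⟨pre, suf, hcs, hpre⟩ := underscore_decomp full.toList h
    have hisin : PySem.Str.isIn "_" full = true := by
      rw [PySem.Str.isIn_iff_infix]
      have h1 : ("_" : String).toList = ['_'] := by decide
      rw [h1, hcs]
      exact ⟨pre, suf, by simp⟩
    have hsplit := splitMax_us full pre suf hcs hpre
    have hfold : full.toList.foldl pvStep (false, [], 0, true) =
        (true, pre, suf.length, suf.all pvIsIdChar) := by
      have hstep : pvStep (false, pre, 0, true) '_' = (true, pre, 0, true) := by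
        simp [pvStep]
      rw [hcs, List.foldl_append, foldl_step_pre pre hpre]
      simp only [List.nil_append, List.foldl_cons, hstep]
      rw [foldl_step_suf]
      simp
    have halls : suf.all (fun c => pvAlphabet.contains c) = suf.all pvIsIdChar := by
      apply all_congr_of_mem
      intro c hcmem
      apply alpha_eq_idchar
      have : c ∈ full.toList := by
        rw [hcs]; exact List.mem_append_right _ (List.mem_cons_of_mem _ hcmem)
      exact List.all_eq_true.1 hdomf c this
    by_cases hp : pre = []
    · subst hp
      simp [validate_id, validate_id_alt, parse_id, hsplit, hfold]
    · have hpe : pre.isEmpty = false := by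
        cases pre with
        | nil => exact absurd rfl hp
        | cons a l => rfl
      by_cases hs : suf = []
      · subst hs
        simp only [validate_id, validate_id_alt, parse_id, hisin, Bool.true_eq_false,
          if_false, hsplit, Option.getD_some, String.toList_ofList,
          hfold]
        cases ep with
        | none => simp
        | some e => cases hb : (!e.toList.isEmpty && decide (pre ≠ e.toList)) <;> simp
      · have hsome : parse_id full = some (String.ofList pre, String.ofList suf) := by
          simp only [parse_id, hisin, Bool.true_eq_false, if_false, hsplit,
            Option.getD_some, String.toList_ofList]
          rw [if_neg (by simp [hp, hs])]
        have hie : suf.isEmpty = false := by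
          cases suf with
          | nil => exact absurd rfl hs
          | cons a l => rfl
        have hlen : (suf.length == 0) = false := by
          cases suf with
          | nil => exact absurd rfl hs
          | cons a l => rfl
        cases ep with
        | none =>
          simp only [validate_id, validate_id_alt, hsome, hfold, String.toList_ofList,
            hpe, hlen, hie]
          rw [halls]
          cases hA2 : suf.all pvIsIdChar <;> simp
        | some e =>
          simp only [validate_id, validate_id_alt, hsome, hfold, String.toList_ofList,
            hpe, hlen, hie]
          rw [halls]
          cases hb : (!e.toList.isEmpty && decide (pre ≠ e.toList)) <;>
            cases hA2 : suf.all pvIsIdChar <;> simp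
  · have hA : PySem.Str.isIn "_" full = false := by
      rw [← Bool.not_eq_true, PySem.Str.isIn_iff_infix]
      have h1 : ("_" : String).toList = ['_'] := by decide
      rw [h1]
      intro hin
      exact h (hin.subset (by simp))
    have hfold : full.toList.foldl pvStep (false, [], 0, true) =
        (false, full.toList, 0, true) := by
      have := foldl_step_pre full.toList h [] 0 true
      simpa using this
    have hA' : PySem.Chars.isIn ['_'] full.toList = false := by
      rw [PySem.Chars.isIn_eq_false_iff]
      intro hin
      exact h (hin.subset (by simp))
    simp [validate_id, validate_id_alt, parse_id, hA', hfold]
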